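-- pv_equiv track=rewrite | github.com/DailyCodingMem/DailyCoding | jong0717/programmers/lv1/lv1-51_부족한금액계산하기.py | solution
-- ===== SOURCE A (Python) =====
-- def solution(price, money, count):
--     result = 0
--     for i in range(1,count+1):
--         result += i
--     if result*price - money > 0:
--         return result*price-money
--     else:
--         return 0
-- ===== SOURCE B (Python) =====
-- def solution(price, money, count):
--     n = max(count, 0)
--     total = n * (n + 1) // 2 * price
--     return max(total - money, 0)
-- ===== Notes on version B (the rewrite author's own statement) =====
-- stated objective: faster
-- what changed: Replaces the O(count) summation loop with the arithmetic-series closed form n*(n+1)//2 and max() instead of the if/else.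
import Mathlib
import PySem

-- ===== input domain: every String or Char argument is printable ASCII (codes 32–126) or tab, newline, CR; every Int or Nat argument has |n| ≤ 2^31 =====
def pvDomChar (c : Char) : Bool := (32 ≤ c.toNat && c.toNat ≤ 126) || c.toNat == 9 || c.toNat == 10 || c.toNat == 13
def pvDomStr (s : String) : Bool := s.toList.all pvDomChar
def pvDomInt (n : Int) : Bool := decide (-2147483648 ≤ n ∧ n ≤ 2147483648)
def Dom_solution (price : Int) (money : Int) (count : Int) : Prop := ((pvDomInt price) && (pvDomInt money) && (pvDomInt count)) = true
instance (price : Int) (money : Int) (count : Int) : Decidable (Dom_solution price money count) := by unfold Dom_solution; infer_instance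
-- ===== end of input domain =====

-- B replaces A's O(count) summation loop with the closed form n*(n+1)//2 (faster, O(1)).

-- ===== PORT A =====
def solution (price : Int) (money : Int) (count : Int) : Int :=
  let result : Int := (PySem.List.pyRange 1 (count + 1) 1).foldl (fun acc i => acc + i) 0
  if result * price - money > 0 then result * price - money else 0

-- ===== PORT B =====
def solution_alt (price : Int) (money : Int) (count : Int) : Int :=
  let n : Int := max count 0
  let total : Int := PySem.Int.floordiv (n * (n + 1)) 2 * price
  max (total - money) 0

-- ===== PRECONDITION & SPEC =====
def Spec_solution (price : Int) (money : Int) (count : Int) (out : Int) : Prop := out = solution_alt price money count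
instance (price : Int) (money : Int) (count : Int) (out : Int) : Decidable (Spec_solution price money count out) := by unfold Spec_solution; infer_instance

-- ===== CLAIM (what is proved, stated in full; the proofs are below) =====
def Claim_equal_solution : Prop := ∀ (price : Int) (money : Int) (count : Int), Dom_solution price money count → Spec_solution price money count (solution price money count)

-- ===== LEMMAS AND PROOFS =====

-- the triangular-number sum: A's loop over range(1, m+1) as an Int fold
theorem pv_tri (m : Nat) :
    2 * ((List.range m).map (fun (k : Nat) => (1 : Int) + (k : Int))).foldl (fun acc i => acc + i) 0
      = (m : Int) * (m + 1) := by
  induction m with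
  | zero => decide
  | succ m ih =>
      rw [List.range_succ, List.map_append, List.foldl_append]
      simp only [List.map_cons, List.map_nil, List.foldl_cons, List.foldl_nil]
      push_cast
      push_cast at ih
      linear_combination ih

theorem pv_loop_eq (count : Int) :
    (PySem.List.pyRange 1 (count + 1) 1).foldl (fun acc i => acc + i) 0
      = PySem.Int.floordiv (max count 0 * (max count 0 + 1)) 2 := by
  rw [PySem.List.pyRange_one, PySem.Int.floordiv_eq_ediv_of_pos (by omega)]
  have h1 : (count + 1 - 1).toNat = count.toNat := by omega
  rw [h1]
  have h3 := pv_tri count.toNat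
  have h2 : (count.toNat : Int) = max count 0 := by omega
  rw [h2] at h3
  generalize hm : max count 0 * (max count 0 + 1) = t at h3 ⊢
  omega

-- ===== VERDICT (by name: the statement is the Claim_ definition above) =====
theorem solution_spec : Claim_equal_solution := by
  intro price money count _
  unfold Spec_solution solution solution_alt
  dsimp only
  rw [pv_loop_eq]
  generalize PySem.Int.floordiv (max count 0 * (max count 0 + 1)) 2 * price = t
  omega
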